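-- pv_equiv track=rewrite | github.com/pypi-data/pypi-mirror-213 | packages/seating/seating-0.0.0-py3-none-any.whl/seating/seating.py | get_seat_sections
-- ===== SOURCE A (Python) =====
-- def get_seat_sections(source: str) -> list[tuple[int, int]]:
--     """Return a list of line number pairs for content between `# Seat` comments in `source`.
--
--     If `source` has no `# Seat` comments, a list with one tuple will be returned: `[(1, number_of_lines_in_source)]`"""
--
--     if "# Seat" in source:
--         lines = source.splitlines()
--         sections = []
--         previous_endline = lambda: sections[-1][1]
--         for i, line in enumerate(lines):
--             if "# Seat" in line:
--                 if not sections: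
--                     sections = [(1, i + 1)]
--                 else:
--                     sections.append((previous_endline() + 1, i + 1))
--         sections.append((previous_endline() + 1, len(lines) + 1))
--         return sections
--     return [(1, len(source.splitlines()) + 1)]
-- ===== SOURCE B (Python) =====
-- def get_seat_sections(source: str) -> list[tuple[int, int]]:
--     """Return a list of line number pairs for content between `# Seat` comments in `source`."""
--     return _sections_from(source.splitlines(), 0)
--
--
-- def _sections_from(lines, start):
--     """Emit the section starting at 0-based line `start`, then recurse past its closing marker."""
--     for k in range(start, len(lines)):
--         if "# Seat" in lines[k]:
--             return [(start + 1, k + 1)] + _sections_from(lines, k + 1)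
--     return [(start + 1, len(lines) + 1)]
-- ===== Notes on version B (the rewrite author's own statement) =====
-- stated objective: alternative
-- what changed: Replaced A's stateful accumulator loop (top-level if/else, previous_endline lambda, first-iteration special case) by a divide-and-recurse scheme: find the next marker line, emit one section, and recurse on the remainder; no accumulator, no branch on whether the source contains a marker.
import Mathlib
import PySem

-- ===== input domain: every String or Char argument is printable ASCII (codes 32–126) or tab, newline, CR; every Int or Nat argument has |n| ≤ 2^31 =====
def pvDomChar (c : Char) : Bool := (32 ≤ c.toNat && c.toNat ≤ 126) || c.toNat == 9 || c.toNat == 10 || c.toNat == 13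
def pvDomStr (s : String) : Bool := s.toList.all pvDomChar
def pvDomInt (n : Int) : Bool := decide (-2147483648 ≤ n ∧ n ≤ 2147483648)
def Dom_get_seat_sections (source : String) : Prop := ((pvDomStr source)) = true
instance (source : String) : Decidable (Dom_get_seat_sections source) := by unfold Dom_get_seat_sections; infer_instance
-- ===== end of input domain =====

-- B replaces A's stateful accumulator loop (top-level if/else, previous_endline lambda,
-- first-iteration special case) by divide-and-recurse: emit the section up to the next marker
-- line, then recurse past it; same O(n) cost, a different decomposition.

-- ===== PORT A =====
-- previous_endline (= sections[-1][1]) is ported with pyGetD and a dummy default: Python only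
-- calls the lambda with `sections` nonempty (the loop has fired whenever `"# Seat" in source`,
-- since "# Seat" contains no line-break character), so the default is never Python-observable.
def get_seat_sections (source : String) : List (Int × Int) :=
  if PySem.Str.isIn "# Seat" source then
    let lines := PySem.Str.splitlines source
    let sections :=
      (PySem.List.enumerate lines).foldl
        (fun sections il =>
          if PySem.Str.isIn "# Seat" il.2 then
            if sections.isEmpty then [((1 : Int), il.1 + 1)]
            else sections ++ [((PySem.List.pyGetD sections (-1) (0, 0)).2 + 1, il.1 + 1)]
          else sections)
        []
    sections ++ [((PySem.List.pyGetD sections (-1) (0, 0)).2 + 1, PySem.List.len lines + 1)]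
  else
    [((1 : Int), PySem.List.len (PySem.Str.splitlines source) + 1)]

-- ===== PORT B =====
-- the inner `for k in range(start, len(lines))` search of _sections_from: first marker index ≥ k
def pvNext (lines : List String) (k : Nat) : Option Nat :=
  if h : k < lines.length then
    if PySem.Str.isIn "# Seat" lines[k] then some k else pvNext lines (k + 1)
  else none
termination_by lines.length - k

-- bound needed by pvSections' termination (cited in its decreasing_by)
theorem pvNext_some_bounds (lines : List String) (k j : Nat) (h : pvNext lines k = some j) :
    k ≤ j ∧ j < lines.length := by
  fun_induction pvNext lines k with
  | case1 k hk hm => cases h; exact ⟨le_refl _, hk⟩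
  | case2 k hk hm ih => have := ih h; omega
  | case3 k hk => cases h

def pvSections (lines : List String) (start : Nat) : List (Int × Int) :=
  match h : pvNext lines start with
  | some k => [((start : Int) + 1, (k : Int) + 1)] ++ pvSections lines (k + 1)
  | none => [((start : Int) + 1, (lines.length : Int) + 1)]
termination_by lines.length - start
decreasing_by have := pvNext_some_bounds lines start k h; omega

def get_seat_sections_alt (source : String) : List (Int × Int) :=
  pvSections (PySem.Str.splitlines source) 0

-- ===== PRECONDITION & SPEC =====
def Spec_get_seat_sections (source : String) (out : List (Int × Int)) : Prop := out = get_seat_sections_alt source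
instance (source : String) (out : List (Int × Int)) : Decidable (Spec_get_seat_sections source out) := by unfold Spec_get_seat_sections; infer_instance

-- ===== CLAIM (what is proved, stated in full; the proofs are below) =====
def Claim_equal_get_seat_sections : Prop := ∀ (source : String), Dom_get_seat_sections source → Spec_get_seat_sections source (get_seat_sections source)

-- ===== LEMMAS AND PROOFS =====

-- `pvPairs p ms` = the pair chain [(p+1,m1),(m1+1,m2),…]; both programs produce instances of it.
def pvPairs (p : Int) : List Int → List (Int × Int)
  | [] => []
  | m :: ms => (p + 1, m) :: pvPairs m ms

def pvMark (il : Int × String) : Option Int :=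
  if PySem.Str.isIn "# Seat" il.2 then some (il.1 + 1) else none

theorem pvPairs_snoc (p x : Int) (ms : List Int) :
    pvPairs p (ms ++ [x]) = pvPairs p ms ++ [(ms.getLastD p + 1, x)] := by
  induction ms generalizing p with
  | nil => rfl
  | cons m ms ih =>
    simp only [List.cons_append, pvPairs, ih m, List.cons.injEq, true_and]
    cases ms with
    | nil => rfl
    | cons m' tl =>
      cases e : (m' :: tl).getLast? with
      | none => exact absurd (List.getLast?_eq_none_iff.mp e) (by simp)
      | some y => simp [List.getLastD]

theorem pvPairs_eq_nil_iff (p : Int) (ms : List Int) : pvPairs p ms = [] ↔ ms = [] := by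
  cases ms <;> simp [pvPairs]

theorem pvPairs_last (p : Int) (ms : List Int) (h : ms ≠ []) :
    (PySem.List.pyGetD (pvPairs p ms) (-1) (0, 0)).2 = ms.getLastD p := by
  induction ms generalizing p with
  | nil => exact absurd rfl h
  | cons m ms ih =>
    cases ms with
    | nil => simp [pvPairs, PySem.List.pyGetD, PySem.List.pyGet?_neg_one]
    | cons m' ms' =>
      have h' := ih m (by simp)
      simp only [pvPairs, PySem.List.pyGetD, PySem.List.pyGet?_neg_one,
        List.getLast?_cons_cons, List.getLastD_cons] at h' ⊢
      simpa [pvPairs] using h'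

-- A's loop, run from `pvPairs 0 ms`, extends the mark list by the marks of the remaining pairs.
theorem pvFold_eq (l : List (Int × String)) (ms : List Int) :
    l.foldl
      (fun sections il =>
        if PySem.Str.isIn "# Seat" il.2 then
          if sections.isEmpty then [((1 : Int), il.1 + 1)]
          else sections ++ [((PySem.List.pyGetD sections (-1) (0, 0)).2 + 1, il.1 + 1)]
        else sections)
      (pvPairs 0 ms)
    = pvPairs 0 (ms ++ l.filterMap pvMark) := by
  induction l generalizing ms with
  | nil => simp
  | cons il l ih =>
    by_cases h : PySem.Str.isIn "# Seat" il.2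
    · have hstep :
        (if (pvPairs 0 ms).isEmpty then [((1 : Int), il.1 + 1)]
         else pvPairs 0 ms ++ [((PySem.List.pyGetD (pvPairs 0 ms) (-1) (0, 0)).2 + 1, il.1 + 1)])
        = pvPairs 0 (ms ++ [il.1 + 1]) := by
        by_cases hm : ms = []
        · subst hm; simp [pvPairs]
        · have hne : (pvPairs 0 ms).isEmpty = false := by
            simp [pvPairs_eq_nil_iff, hm]
          rw [hne]
          simp [pvPairs_snoc, pvPairs_last 0 ms hm]
      rw [List.foldl_cons, if_pos h, hstep, ih (ms ++ [il.1 + 1]),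
        List.filterMap_cons_some (by rw [pvMark, if_pos h]), List.append_assoc,
        List.singleton_append]
    · rw [List.foldl_cons, if_neg h]
      rw [ih ms, List.filterMap_cons_none (by rw [pvMark, if_neg h])]

-- B's recursion: the marks of the tail of the enumeration, characterised by pvNext.
theorem pvDrop_marks (lines : List String) (s : Nat) :
    ((PySem.List.enumerate lines).drop s).filterMap pvMark
      = match pvNext lines s with
        | some j => ((j : Int) + 1) :: ((PySem.List.enumerate lines).drop (j + 1)).filterMap pvMark
        | none => [] := by
  fun_induction pvNext lines s with
  | case1 k hk hm =>
    rw [List.drop_eq_getElem_cons (by simpa [PySem.List.length_enumerate] using hk),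
      PySem.List.getElem_enumerate,
      List.filterMap_cons_some (show pvMark ((0 : Int) + (k : Int), lines[k]) = some ((k : Int) + 1)
        by rw [pvMark, if_pos hm]; norm_num)]
  | case2 k hk hm ih =>
    rw [List.drop_eq_getElem_cons (by simpa [PySem.List.length_enumerate] using hk),
      PySem.List.getElem_enumerate,
      List.filterMap_cons_none (show pvMark ((0 : Int) + (k : Int), lines[k]) = none
        by rw [pvMark, if_neg hm])]
    exact ih
  | case3 k hk =>
    rw [List.drop_eq_nil_of_le (by simpa [PySem.List.length_enumerate] using hk)]
    simp

theorem pvSections_eq (lines : List String) (s : Nat) :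
    pvSections lines s
      = pvPairs (s : Int)
          (((PySem.List.enumerate lines).drop s).filterMap pvMark ++ [(lines.length : Int) + 1]) := by
  fun_induction pvSections lines s with
  | case1 s j h ih =>
    rw [pvDrop_marks lines s, h, ih]
    simp [pvPairs]
  | case2 s h =>
    rw [pvDrop_marks lines s, h]
    simp [pvPairs]

-- every splitlines piece is a contiguous piece of the input (invariant of splitlines.go)
theorem pvGo_mem (isB : Char → Bool) (s cur : List Char) (acc : List (List Char)) :
    ∀ l ∈ PySem.Chars.splitlines.go isB s cur acc,
      l ∈ acc ∨ (∃ t, t <+: s ∧ l = cur.reverse ++ t) ∨ ∃ j, l <+: List.drop j s := by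
  fun_induction PySem.Chars.splitlines.go isB s cur acc with
  | case1 cur acc hc =>
    intro l hl
    exact .inl (List.mem_reverse.mp hl)
  | case2 cur acc hc =>
    intro l hl
    rcases List.mem_cons.mp (List.mem_reverse.mp hl) with hl | hl
    · exact .inr (.inl ⟨[], List.nil_prefix, by simp [hl]⟩)
    · exact .inl hl
  | case3 rest cur acc ih =>
    intro l hl
    rcases ih l hl with h | ⟨t, ht, hl'⟩ | ⟨j, hj⟩
    · rcases List.mem_cons.mp h with h | h
      · exact .inr (.inl ⟨[], List.nil_prefix, by simp [h]⟩)
      · exact .inl h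
    · exact .inr (.inr ⟨2, by simpa [hl'] using ht⟩)
    · exact .inr (.inr ⟨j + 2, by
        rw [show j + 2 = (j + 1) + 1 from rfl, List.drop_succ_cons, List.drop_succ_cons]
        exact hj⟩)
  | case4 c rest cur acc hne hB ih =>
    intro l hl
    rcases ih l hl with h | ⟨t, ht, hl'⟩ | ⟨j, hj⟩
    · rcases List.mem_cons.mp h with h | h
      · exact .inr (.inl ⟨[], List.nil_prefix, by simp [h]⟩)
      · exact .inl h
    · exact .inr (.inr ⟨1, by simpa [hl'] using ht⟩)
    · exact .inr (.inr ⟨j + 1, by rw [List.drop_succ_cons]; exact hj⟩)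
  | case5 c rest cur acc hne hB ih =>
    intro l hl
    rcases ih l hl with h | ⟨t, ht, hl'⟩ | ⟨j, hj⟩
    · exact .inl h
    · exact .inr (.inl ⟨c :: t, List.cons_prefix_cons.mpr ⟨rfl, ht⟩, by simp [hl']⟩)
    · exact .inr (.inr ⟨j + 1, by rw [List.drop_succ_cons]; exact hj⟩)

theorem pvSplitlines_infix (s l : List Char) (h : l ∈ PySem.Chars.splitlines s) : l <:+: s := by
  rcases pvGo_mem _ s [] [] l h with h' | ⟨t, ht, hl'⟩ | ⟨j, hj⟩
  · simp at h'
  · simpa [hl'] using ht.isInfix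
  · exact hj.isInfix.trans (List.drop_suffix j s).isInfix

-- ===== VERDICT (by name: the statement is the Claim_ definition above) =====
theorem get_seat_sections_spec : Claim_equal_get_seat_sections := by
  intro source _
  unfold Spec_get_seat_sections get_seat_sections get_seat_sections_alt
  set lines := PySem.Str.splitlines source with hlines
  rw [pvSections_eq lines 0, List.drop_zero]
  simp only [Nat.cast_zero]
  by_cases hin : PySem.Str.isIn "# Seat" source
  · simp only [hin, if_true]
    have hfold := pvFold_eq (PySem.List.enumerate lines) []
    simp only [pvPairs, List.nil_append] at hfold
    rw [hfold]
    set marks := (PySem.List.enumerate lines).filterMap pvMark with hmarks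
    rw [pvPairs_snoc 0 ((lines.length : Int) + 1) marks]
    have hlen : PySem.List.len lines = (lines.length : Int) := rfl
    rw [hlen]
    congr 2
    by_cases hm : marks = []
    · simp [hm, PySem.List.pyGetD, PySem.List.pyGet?, PySem.List.pyIdx?, pvPairs]
    · rw [pvPairs_last 0 marks hm]
  · simp only [hin]
    have hmarks : (PySem.List.enumerate lines).filterMap pvMark = [] := by
      rw [List.filterMap_eq_nil_iff]
      intro il hil
      have hmem : il.2 ∈ lines := by
        have hsnd := PySem.List.map_snd_enumerate (xs := lines) (s := 0)
        rw [← hsnd]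
        exact List.mem_map_of_mem hil
      have hinf : il.2.toList <:+: source.toList := by
        apply pvSplitlines_infix
        rw [← PySem.Str.splitlines_map_toList]
        exact List.mem_map_of_mem hmem
      by_cases hl : PySem.Str.isIn "# Seat" il.2
      · exfalso
        apply hin
        rw [PySem.Str.isIn_iff_infix] at hl ⊢
        exact hl.trans hinf
      · rw [pvMark, if_neg hl]
    rw [hmarks]
    rfl
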